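-- pv_equiv track=rewrite | github.com/Rohsooil/CodingTestStudy | python/11-14/NumberGame.py | solution
-- ===== SOURCE A (Python) =====
-- def solution(A, B):
--     A.sort()
--     B.sort()
--
--     start = 0
--     answer = 0
--
--     for i in range(len(A)):
--         for j in range(start, len(B)):
--             if A[i] < B[j]:
--                 answer += 1
--                 start = j + 1
--                 break
--
--     return answer
-- ===== SOURCE B (Python) =====
-- def solution(A, B):
--     A.sort()
--     B.sort()
--     j = 0
--     answer = 0
--     for a in A:
--         while j < len(B) and B[j] <= a:
--             j += 1
--         if j < len(B):
--             answer += 1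
--             j += 1
--     return answer
-- ===== Notes on version B (the rewrite author's own statement) =====
-- stated objective: faster
-- what changed: Replaced the nested re-scanning loop (which rescans B from the same start index for every remaining A element after a failed match) with a single two-pointer sweep that advances j monotonically, so B is never scanned more than once overall.
import Mathlib
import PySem

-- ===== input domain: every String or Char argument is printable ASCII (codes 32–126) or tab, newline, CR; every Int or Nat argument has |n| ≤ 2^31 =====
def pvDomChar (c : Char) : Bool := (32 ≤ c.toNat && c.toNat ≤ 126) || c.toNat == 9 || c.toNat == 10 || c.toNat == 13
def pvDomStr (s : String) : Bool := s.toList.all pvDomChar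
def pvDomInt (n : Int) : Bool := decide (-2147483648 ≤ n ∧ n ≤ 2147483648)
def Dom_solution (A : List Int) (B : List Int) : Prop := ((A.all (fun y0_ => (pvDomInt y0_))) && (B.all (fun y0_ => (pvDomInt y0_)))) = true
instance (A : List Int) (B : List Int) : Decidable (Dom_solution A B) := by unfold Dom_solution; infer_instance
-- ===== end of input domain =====

-- B replaces A's nested re-scanning inner loop with a single monotone two-pointer sweep over B
-- (objective: faster inner phase; both programs sort A and B in place, so both mutate their
-- arguments identically — the equivalence proved here is about the return value).


-- ===== PORT A =====
-- inner 'for j in range(start, len(B)): if A[i] < B[j]: … break' — returns the j that breaks, if any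
def solInner (Bs : List Int) (a : Int) (j : Nat) : Option Nat :=
  if h : j < Bs.length then
    if a < Bs[j] then some j else solInner Bs a (j + 1)
  else none
termination_by Bs.length - j

def solution (A : List Int) (B : List Int) : Int :=
  let As := PySem.List.sorted A (fun x => x) false
  let Bs := PySem.List.sorted B (fun x => x) false
  -- A[i] with 0 ≤ i < len(A): always in range, so getD never uses the default
  let st := (List.range As.length).foldl
    (fun (s : Nat × Int) i =>
      match solInner Bs (As.getD i 0) s.1 with
      | some j => (j + 1, s.2 + 1)
      | none => s) (0, 0)
  st.2

-- ===== PORT B =====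
-- 'while j < len(B) and B[j] <= a: j += 1'
def solSkip (Bs : List Int) (a : Int) (j : Nat) : Nat :=
  if h : j < Bs.length then
    if Bs[j] ≤ a then solSkip Bs a (j + 1) else j
  else j
termination_by Bs.length - j

def solGo (Bs : List Int) : List Int → Nat → Int → Int
  | [], _, ans => ans
  | a :: rest, j, ans =>
    let j' := solSkip Bs a j
    if j' < Bs.length then solGo Bs rest (j' + 1) (ans + 1)
    else solGo Bs rest j' ans

def solution_alt (A : List Int) (B : List Int) : Int :=
  let As := PySem.List.sorted A (fun x => x) false
  let Bs := PySem.List.sorted B (fun x => x) false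
  solGo Bs As 0 0

-- ===== PRECONDITION & SPEC =====
def Spec_solution (A : List Int) (B : List Int) (out : Int) : Prop := out = solution_alt A B
instance (A : List Int) (B : List Int) (out : Int) : Decidable (Spec_solution A B out) := by unfold Spec_solution; infer_instance

-- ===== CLAIM (what is proved, stated in full; the proofs are below) =====
def Claim_equal_solution : Prop := ∀ (A : List Int) (B : List Int), Dom_solution A B → Spec_solution A B (solution A B)

-- ===== LEMMAS AND PROOFS =====

-- A's outer loop, restated as a fold over the sorted list itself
def solFoldA (Bs : List Int) : List Int → Nat → Int → Int
  | [], _, ans => ans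
  | a :: rest, start, ans =>
    match solInner Bs a start with
    | some j => solFoldA Bs rest (j + 1) (ans + 1)
    | none => solFoldA Bs rest start ans

theorem solInner_eq_skip (Bs : List Int) (a : Int) (j : Nat) :
    solInner Bs a j = if solSkip Bs a j < Bs.length then some (solSkip Bs a j) else none := by
  fun_induction solSkip Bs a j with
  | case1 j h hle ih =>
    rw [solInner]
    simp only [h, dif_pos]
    rw [if_neg (by omega), ih]
  | case2 j h hgt =>
    rw [solInner]
    simp [h, hgt]
  | case3 j h =>
    rw [solInner]
    simp [h]

theorem solSkip_mono (Bs : List Int) (a a' : Int) (haa : a ≤ a') (j : Nat)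
    (hfail : ¬ solSkip Bs a j < Bs.length) : ¬ solSkip Bs a' j < Bs.length := by
  fun_induction solSkip Bs a j with
  | case1 j h hle ih =>
    rw [solSkip, dif_pos h, if_pos (le_trans hle haa)]
    exact ih hfail
  | case2 j h hgt => omega
  | case3 j h =>
    rw [solSkip, dif_neg h]
    omega

theorem solSkip_of_out (Bs : List Int) (a : Int) (j : Nat) (hj : ¬ j < Bs.length) :
    solSkip Bs a j = j := by rw [solSkip, dif_neg hj]

-- after a failed match at state `start`, A counts nothing more (A sorted ascending)
theorem solFoldA_fail (Bs : List Int) (As : List Int) (a : Int)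
    (hs : As.Pairwise (· ≤ ·)) (hge : ∀ x ∈ As, a ≤ x) (start : Nat)
    (hfail : ¬ solSkip Bs a start < Bs.length) (ans : Int) :
    solFoldA Bs As start ans = ans := by
  induction As generalizing ans with
  | nil => rfl
  | cons x rest ih =>
    have hx : a ≤ x := hge x (by simp)
    have hxfail := solSkip_mono Bs a x hx start hfail
    rw [solFoldA, solInner_eq_skip, if_neg hxfail]
    exact ih hs.of_cons (fun y hy => le_trans hx (List.rel_of_pairwise_cons hs hy)) ans

-- B counts nothing more once the pointer is at/past the end
theorem solGo_fail (Bs : List Int) (As : List Int) (j : Nat)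
    (hj : ¬ j < Bs.length) (ans : Int) : solGo Bs As j ans = ans := by
  induction As with
  | nil => rfl
  | cons x rest ih =>
    rw [solGo]
    simp only [solSkip_of_out Bs x j hj, if_neg hj]
    exact ih

theorem solFoldA_eq_solGo (Bs : List Int) (As : List Int)
    (hs : As.Pairwise (· ≤ ·)) (j : Nat) (ans : Int) :
    solFoldA Bs As j ans = solGo Bs As j ans := by
  induction As generalizing j ans with
  | nil => rfl
  | cons a rest ih =>
    rw [solFoldA, solGo, solInner_eq_skip]
    by_cases h : solSkip Bs a j < Bs.length
    · simp only [if_pos h]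
      exact ih hs.of_cons (solSkip Bs a j + 1) (ans + 1)
    · simp only [if_neg h]
      rw [solFoldA_fail Bs rest a hs.of_cons (fun y hy => List.rel_of_pairwise_cons hs hy) j h,
        solGo_fail Bs rest (solSkip Bs a j) h]

-- foldl over range(len L) reading L.getD is the structural foldl over L
theorem foldl_range'_getD {α σ : Type} (f : σ → α → σ) (d : α) :
    ∀ (tail pre : List α) (s : σ),
      (List.range' pre.length tail.length).foldl
        (fun s i => f s ((pre ++ tail).getD i d)) s = tail.foldl f s := by
  intro tail
  induction tail with
  | nil => intro pre s; rfl
  | cons a t ih =>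
    intro pre s
    rw [List.length_cons, List.range'_succ, List.foldl_cons, List.foldl_cons]
    have h1 : (pre ++ a :: t).getD pre.length d = a := by
      simp [List.getD]
    rw [h1]
    have h2 : pre ++ a :: t = (pre ++ [a]) ++ t := by simp
    have h3 : pre.length + 1 = (pre ++ [a]).length := by simp
    rw [h2, h3]
    exact ih (pre ++ [a]) (f s a)

theorem foldl_range_getD {α σ : Type} (f : σ → α → σ) (d : α) (L : List α) (s : σ) :
    (List.range L.length).foldl (fun s i => f s (L.getD i d)) s = L.foldl f s := by
  have := foldl_range'_getD f d L [] s
  simpa [List.range_eq_range'] using this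

-- the paired foldl computes solFoldA in its second component
theorem foldl_pair_eq_solFoldA (Bs : List Int) (As : List Int) (j : Nat) (ans : Int) :
    (As.foldl (fun (s : Nat × Int) a =>
        match solInner Bs a s.1 with
        | some k => (k + 1, s.2 + 1)
        | none => s) (j, ans)).2 = solFoldA Bs As j ans := by
  induction As generalizing j ans with
  | nil => rfl
  | cons a rest ih =>
    rw [List.foldl_cons, solFoldA]
    cases h : solInner Bs a j with
    | some k => exact ih (k + 1) (ans + 1)
    | none => exact ih j ans

theorem solution_spec : Claim_equal_solution := by
  intro A B _
  unfold Spec_solution solution solution_alt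
  simp only
  rw [foldl_range_getD (fun (s : Nat × Int) a =>
        match solInner (PySem.List.sorted B (fun x => x) false) a s.1 with
        | some k => (k + 1, s.2 + 1)
        | none => s) 0]
  rw [foldl_pair_eq_solFoldA]
  exact solFoldA_eq_solGo _ _ (PySem.List.sorted_pairwise A (fun x => x)) 0 0
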